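-- pv_equiv track=rewrite | github.com/xiaojiou176-open/OpenVibeCoding | apps/orchestrator/src/openvibecoding_orch/api/routes_admin.py | _is_pending_after_latest_required
-- ===== SOURCE A (Python) =====
-- from typing import Any, Callable
--
-- def _is_pending_after_latest_required(events: list[dict[str, Any]]) -> bool:
--     last_required_index: int | None = None
--     for index, event in enumerate(events):
--         if isinstance(event, dict) and event.get("event") == "HUMAN_APPROVAL_REQUIRED":
--             last_required_index = index
--     if last_required_index is None:
--         return False
--     for event in events[last_required_index + 1 :]:
--         if isinstance(event, dict) and event.get("event") == "HUMAN_APPROVAL_COMPLETED":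
--             return False
--     return True
-- ===== SOURCE B (Python) =====
-- def _is_pending_after_latest_required(events: list) -> bool:
--     # Single backward early-exit scan: the most recent approval marker decides.
--     for event in reversed(events):
--         if isinstance(event, dict):
--             value = event.get("event")
--             if value == "HUMAN_APPROVAL_COMPLETED":
--                 return False
--             if value == "HUMAN_APPROVAL_REQUIRED":
--                 return True
--     return False
-- ===== Notes on version B (the rewrite author's own statement) =====
-- stated objective: simpler
-- what changed: Replaces the forward pass that records the last HUMAN_APPROVAL_REQUIRED index plus a second scan over the tail slice with one backward early-exit scan that returns on the first approval marker seen from the end.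
import Mathlib
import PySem

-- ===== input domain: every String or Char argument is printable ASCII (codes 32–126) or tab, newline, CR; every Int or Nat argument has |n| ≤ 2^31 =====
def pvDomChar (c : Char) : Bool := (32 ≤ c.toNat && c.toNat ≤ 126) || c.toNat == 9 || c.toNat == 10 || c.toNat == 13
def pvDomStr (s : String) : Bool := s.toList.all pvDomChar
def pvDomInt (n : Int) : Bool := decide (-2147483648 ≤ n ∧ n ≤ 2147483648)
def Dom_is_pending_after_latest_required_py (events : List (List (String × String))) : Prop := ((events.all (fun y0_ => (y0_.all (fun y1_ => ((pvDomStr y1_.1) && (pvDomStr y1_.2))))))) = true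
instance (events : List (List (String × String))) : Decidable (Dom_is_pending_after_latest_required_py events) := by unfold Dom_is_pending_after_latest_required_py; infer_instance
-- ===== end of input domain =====

-- B replaces A's two forward passes (find last REQUIRED index, then rescan the tail slice)
-- by one backward early-exit scan; objective: simpler.

-- shared primitive: event.get("event") on the association-list dict (first match)
def pvGetEvent (e : List (String × String)) : Option String := (PySem.Dict.mk e).get? "event"

-- ===== PORT A =====
-- second loop of A: 'for event in tail: if …COMPLETED: return False; return True'
def pvLoop2 : List (List (String × String)) → Bool
  | [] => true
  | e :: rest => if pvGetEvent e == some "HUMAN_APPROVAL_COMPLETED" then false else pvLoop2 rest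

def is_pending_after_latest_required_py (events : List (List (String × String))) : Bool :=
  let lri : Option Int := (PySem.List.enumerate events).foldl
    (fun acc p => if pvGetEvent p.2 == some "HUMAN_APPROVAL_REQUIRED" then some p.1 else acc) none
  match lri with
  | none => false
  | some i => pvLoop2 (PySem.List.slice events (some (i + 1)) none)

-- ===== PORT B =====
-- backward scan: 'for event in reversed(events): …' with two early returns
def pvScanBack : List (List (String × String)) → Bool
  | [] => false
  | e :: rest =>
    if pvGetEvent e == some "HUMAN_APPROVAL_COMPLETED" then false
    else if pvGetEvent e == some "HUMAN_APPROVAL_REQUIRED" then true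
    else pvScanBack rest

def is_pending_after_latest_required_py_alt (events : List (List (String × String))) : Bool :=
  pvScanBack events.reverse

-- ===== PRECONDITION & SPEC =====
def Spec_is_pending_after_latest_required_py (events : List (List (String × String))) (out : Bool) : Prop := out = is_pending_after_latest_required_py_alt events
instance (events : List (List (String × String))) (out : Bool) : Decidable (Spec_is_pending_after_latest_required_py events out) := by unfold Spec_is_pending_after_latest_required_py; infer_instance

-- ===== CLAIM (what is proved, stated in full; the proofs are below) =====
def Claim_equal_is_pending_after_latest_required_py : Prop := ∀ (events : List (List (String × String))), Dom_is_pending_after_latest_required_py events → Spec_is_pending_after_latest_required_py events (is_pending_after_latest_required_py events)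

-- ===== LEMMAS AND PROOFS =====

-- A's last-required-index accumulator, named for the lemmas
def pvLri (events : List (List (String × String))) : Option Int :=
  (PySem.List.enumerate events).foldl
    (fun acc p => if pvGetEvent p.2 == some "HUMAN_APPROVAL_REQUIRED" then some p.1 else acc) none

theorem pvEnumerate_append (xs ys : List (List (String × String))) (s : Int) :
    PySem.List.enumerate (xs ++ ys) s = PySem.List.enumerate xs s ++ PySem.List.enumerate ys (s + xs.length) := by
  induction xs generalizing s with
  | nil => simp [PySem.List.enumerate_nil]
  | cons x xs ih =>
    simp [PySem.List.enumerate_cons, ih]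
    ring_nf

theorem pvLri_append_singleton (es : List (List (String × String))) (e : List (String × String)) :
    pvLri (es ++ [e]) =
      if pvGetEvent e == some "HUMAN_APPROVAL_REQUIRED" then some (es.length : Int) else pvLri es := by
  unfold pvLri
  rw [pvEnumerate_append, List.foldl_append]
  simp [PySem.List.enumerate_cons, PySem.List.enumerate_nil]

theorem pvLri_bounds_aux (es : List (List (String × String))) :
    ∀ (s : Int) (acc : Option Int) (i : Int),
      (PySem.List.enumerate es s).foldl
        (fun acc p => if pvGetEvent p.2 == some "HUMAN_APPROVAL_REQUIRED" then some p.1 else acc) acc = some i →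
      acc = some i ∨ (s ≤ i ∧ i < s + es.length) := by
  induction es with
  | nil => intro s acc i h; simp [PySem.List.enumerate_nil] at h; exact Or.inl h
  | cons e es ih =>
    intro s acc i h
    simp only [PySem.List.enumerate_cons, List.foldl_cons] at h
    rcases ih (s + 1) _ i h with h' | h'
    · cases hc : pvGetEvent e == some "HUMAN_APPROVAL_REQUIRED"
      · rw [hc] at h'; simp at h'
        exact Or.inl h'
      · rw [hc] at h'; simp at h'
        right
        simp only [List.length_cons]
        push_cast
        omega
    · right
      simp only [List.length_cons]
      push_cast
      omega

theorem pvLri_bounds (es : List (List (String × String))) (i : Int)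
    (h : pvLri es = some i) : 0 ≤ i ∧ i < es.length := by
  rcases pvLri_bounds_aux es 0 none i h with h' | h'
  · simp at h'
  · omega

theorem pvLoop2_append_singleton (xs : List (List (String × String))) (e : List (String × String)) :
    pvLoop2 (xs ++ [e]) =
      (pvLoop2 xs && !(pvGetEvent e == some "HUMAN_APPROVAL_COMPLETED")) := by
  induction xs with
  | nil => cases hc : pvGetEvent e == some "HUMAN_APPROVAL_COMPLETED" <;> simp [pvLoop2, hc]
  | cons x xs ih =>
    cases hc : pvGetEvent x == some "HUMAN_APPROVAL_COMPLETED" <;>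
      simp [pvLoop2, hc, ih]

-- A written via pvLri (definitional)
theorem pvA_eq (events : List (List (String × String))) :
    is_pending_after_latest_required_py events =
      match pvLri events with
      | none => false
      | some i => pvLoop2 (PySem.List.slice events (some (i + 1))) := rfl

theorem pvMain (events : List (List (String × String))) :
    is_pending_after_latest_required_py events = pvScanBack events.reverse := by
  induction events using List.reverseRecOn with
  | nil => rfl
  | append_singleton es e ih =>
    rw [pvA_eq] at ih ⊢
    rw [pvLri_append_singleton, List.reverse_append, List.reverse_singleton,
        List.singleton_append]
    cases hreq : pvGetEvent e == some "HUMAN_APPROVAL_REQUIRED"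
    · -- e is not REQUIRED: lri unchanged
      rw [if_neg (by simp)]
      cases hcomp : pvGetEvent e == some "HUMAN_APPROVAL_COMPLETED"
      · -- e irrelevant: both sides reduce to the es case
        simp only [pvScanBack, hcomp, hreq, Bool.false_eq_true, if_false]
        rw [← ih]
        cases hl : pvLri es with
        | none => rfl
        | some i =>
          have hb := pvLri_bounds es i hl
          simp only
          rw [PySem.List.slice_from _ (by omega),
              List.drop_append_of_le_length (by simp; omega),
              pvLoop2_append_singleton,
              PySem.List.slice_from _ (by omega)]
          simp [hcomp]
      · -- e is COMPLETED: B returns false; A's loop2 hits e (or lri is none)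
        simp only [pvScanBack, hcomp, if_true]
        cases hl : pvLri es with
        | none => rfl
        | some i =>
          have hb := pvLri_bounds es i hl
          simp only
          rw [PySem.List.slice_from _ (by omega),
              List.drop_append_of_le_length (by simp; omega),
              pvLoop2_append_singleton]
          simp [hcomp]
    · -- e is REQUIRED: new last index is es.length; the tail slice is empty
      have hne : (pvGetEvent e == some "HUMAN_APPROVAL_COMPLETED") = false := by
        cases h : pvGetEvent e == some "HUMAN_APPROVAL_COMPLETED"
        · rfl
        · simp at hreq h; rw [h] at hreq; simp at hreq
      rw [if_pos (by simp)]
      simp only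
      rw [PySem.List.slice_from _ (by positivity)]
      have hdrop : (es ++ [e]).drop ((es.length : Int) + 1).toNat = ([] : List (List (String × String))) := by
        apply List.drop_eq_nil_of_le
        simp
      rw [hdrop]
      simp [pvScanBack, hne, hreq, pvLoop2]

-- ===== VERDICT (by name: the statement is the Claim_ definition above) =====
theorem is_pending_after_latest_required_py_spec : Claim_equal_is_pending_after_latest_required_py := by
  intro events _
  unfold Spec_is_pending_after_latest_required_py is_pending_after_latest_required_py_alt
  exact pvMain events
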